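-- pv_equiv track=rewrite | github.com/DueUtil/DueUtil | botstuff/util.py | clear_mentions
-- ===== SOURCE A (Python) =====
-- def clear_mentions(message):
--     mainStr = message;
--     cleanStr ="";
--     Start = False;
--     for x in range (0,len(mainStr)):
--         if mainStr[x] == '<' and mainStr[:x+2].endswith('@'):
--             Start = True;
--         elif mainStr[x] == '>' and Start:
--             Start = False;
--         elif not Start:
--             cleanStr = cleanStr + mainStr[x];
--     return cleanStr;
-- ===== SOURCE B (Python) =====
-- def clear_mentions(message):
--     out = []
--     i = 0
--     n = len(message)
--     while i < n:
--         if i + 1 < n and message[i] == '<' and message[i + 1] == '@':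
--             k = message.find('>', i + 2)
--             i = n if k == -1 else k + 1
--         else:
--             out.append(message[i])
--             i += 1
--     return ''.join(out)
-- ===== Notes on version B (the rewrite author's own statement) =====
-- stated objective: alternative
-- what changed: Replaces A's per-character scan with a Start flag and an endswith check on a growing slice at every character by a skip-ahead scanner: at each mention opener it jumps directly past the mention's closing bracket using str.find, copying characters only outside mentions.
import Mathlib
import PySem

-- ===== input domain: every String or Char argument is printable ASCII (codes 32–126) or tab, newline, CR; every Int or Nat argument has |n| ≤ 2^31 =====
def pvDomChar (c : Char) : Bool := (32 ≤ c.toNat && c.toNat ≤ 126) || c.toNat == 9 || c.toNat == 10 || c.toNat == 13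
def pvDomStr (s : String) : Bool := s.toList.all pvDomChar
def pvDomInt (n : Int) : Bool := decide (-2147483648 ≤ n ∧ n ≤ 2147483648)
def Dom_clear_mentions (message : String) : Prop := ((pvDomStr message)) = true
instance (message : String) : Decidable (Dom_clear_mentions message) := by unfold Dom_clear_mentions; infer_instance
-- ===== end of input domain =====

-- B replaces A's per-character Start-flag scan (with an endswith check on a growing
-- slice at every character) by a skip-ahead scanner that jumps past each mention
-- with str.find; same return value, different traversal (objective: alternative).

-- ===== PORT A =====
-- loop body of A: x is the current index, state = (cleanStr, Start)
def pvStepA (mainStr : List Char) (st : List Char × Bool) (x : Int) : List Char × Bool :=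
  let c := PySem.List.pyGetD mainStr x ' '
  if c = '<' ∧ PySem.Chars.endswith (PySem.Chars.slice mainStr none (some (x + 2))) ['@'] = true then
    (st.1, true)
  else if c = '>' ∧ st.2 = true then
    (st.1, false)
  else if st.2 = false then
    (st.1 ++ [c], st.2)
  else st

def clear_mentions (message : String) : String :=
  String.ofList
    (((PySem.List.pyRange 0 (PySem.Chars.len message.toList) 1).foldl
        (pvStepA message.toList) ([], false)).1)

-- ===== PORT B =====
-- termination helper for the while loop of B: when find('>', i+2) succeeds its
-- result is ≥ i+2, so the loop index strictly increases
lemma pvFindFrom_ge (cs : List Char) (i : Nat) (hi : i + 2 ≤ cs.length)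
    (hk : PySem.Chars.findFrom cs ['>'] ((i : Int) + 2) none ≠ -1) :
    (i : Int) + 2 ≤ PySem.Chars.findFrom cs ['>'] ((i : Int) + 2) none := by
  have hcast : ((i : Int) + 2) = ((i + 2 : Nat) : Int) := by push_cast; ring
  rw [hcast] at hk ⊢
  rw [PySem.Chars.findFrom_natCast cs ['>'] (i + 2) hi] at hk ⊢
  have hfind := PySem.Chars.neg_one_le_find (cs.drop (i + 2)) ['>']
  split at hk
  · exact absurd rfl hk
  · rename_i hne
    split
    · rename_i hne2; exact absurd hne2 hne
    · push_cast; omega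

-- while loop of B; i is the loop index, the emitted characters are the result
-- (Python accumulates them in `out` and joins at the end)
def pvBLoop (cs : List Char) (i : Nat) : List Char :=
  if h : i < cs.length then
    if hc : i + 1 < cs.length ∧ PySem.List.pyGetD cs (i : Int) ' ' = '<'
        ∧ PySem.List.pyGetD cs ((i : Int) + 1) ' ' = '@' then
      let k := PySem.Chars.findFrom cs ['>'] ((i : Int) + 2) none
      if hk : k = -1 then pvBLoop cs cs.length
      else pvBLoop cs (k.toNat + 1)   -- k ≥ 0 here, so toNat is exact
    else
      PySem.List.pyGetD cs (i : Int) ' ' :: pvBLoop cs (i + 1)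
  else []
termination_by cs.length - i
decreasing_by
  · omega
  · have := pvFindFrom_ge cs i (by omega) hk
    have hk0 : (0:Int) ≤ PySem.Chars.findFrom cs ['>'] ((i : Int) + 2) none := by omega
    omega
  · omega

def clear_mentions_alt (message : String) : String :=
  String.ofList (pvBLoop message.toList 0)

-- ===== PRECONDITION & SPEC =====
def Spec_clear_mentions (message : String) (out : String) : Prop := out = clear_mentions_alt message
instance (message : String) (out : String) : Decidable (Spec_clear_mentions message out) := by unfold Spec_clear_mentions; infer_instance

-- ===== CLAIM (what is proved, stated in full; the proofs are below) =====
def Claim_equal_clear_mentions : Prop := ∀ (message : String), Dom_clear_mentions message → Spec_clear_mentions message (clear_mentions message)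

-- ===== LEMMAS AND PROOFS =====

-- drop the rest of a mention: everything up to and including the first '>'
def pvDropMention : List Char → List Char
  | [] => []
  | c :: rest => if c = '>' then rest else pvDropMention rest

lemma pvDropMention_length_le (l : List Char) : (pvDropMention l).length ≤ l.length := by
  induction l with
  | nil => simp [pvDropMention]
  | cons c rest ih =>
    simp only [pvDropMention]
    split
    · simp
    · simp; omega

-- common reference function: delete every '<@…>' mention
def pvScrub : List Char → List Char
  | [] => []
  | c :: rest =>
    if c = '<' ∧ rest.head? = some '@' then pvScrub (pvDropMention rest)
    else c :: pvScrub rest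
termination_by cs => cs.length
decreasing_by
  · have := pvDropMention_length_le rest; simp; omega
  · simp

-- A's loop as a recursion over the remaining suffix: (emitted chars, final Start flag)
def pvLoopP : List Char → Bool → List Char × Bool
  | [], s => ([], s)
  | c :: rest, s =>
    if c = '<' ∧ rest.head? = some '@' then pvLoopP rest true
    else if c = '>' ∧ s = true then pvLoopP rest false
    else if s = false then
      let p := pvLoopP rest false
      (c :: p.1, p.2)
    else pvLoopP rest s

lemma pvSingleton_suffix (a : Char) (l : List Char) : [a] <:+ l ↔ l.getLast? = some a := by
  rw [List.getLast?_eq_some_iff]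
  constructor
  · rintro ⟨t, ht⟩; exact ⟨t, ht.symm⟩
  · rintro ⟨t, rfl⟩; exact ⟨t, rfl⟩

lemma pvSingleton_prefix (a : Char) (l : List Char) : [a] <+: l ↔ l.head? = some a := by
  constructor
  · rintro ⟨t, rfl⟩; rfl
  · intro h
    cases l with
    | nil => simp at h
    | cons b t => simp at h; exact ⟨t, by simp [h]⟩

-- A's mention-start test at index k is: cs[k] = '<' and the next character is '@'
lemma pvCondA (cs : List Char) (k : Nat) (hk : k < cs.length) (hlt : cs[k] = '<') :
    (PySem.Chars.endswith (PySem.Chars.slice cs none (some ((k : Int) + 2))) ['@'] = true)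
      ↔ ((cs.drop (k + 1)).head? = some '@') := by
  have hcast : ((k : Int) + 2) = ((k + 2 : Nat) : Int) := by push_cast; ring
  rw [hcast, PySem.Chars.slice_eq_listSlice, PySem.List.slice_to_natCast,
    PySem.Chars.endswith_iff, pvSingleton_suffix]
  have htake : cs.take (k + 2) = cs.take k ++ (cs.drop k).take 2 := List.take_add
  have hdrop : cs.drop k = cs[k] :: cs.drop (k + 1) := List.drop_eq_getElem_cons hk
  rw [htake, hdrop]
  cases hrest : cs.drop (k + 1) with
  | nil =>
    simp only [List.take, List.getLast?_append, hlt]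
    simp
  | cons r t =>
    simp only [List.take, List.getLast?_append]
    simp

lemma pvL1 (m : Nat) : ∀ (cs : List Char) (k : Nat), cs.length ≤ k + m → ∀ (acc : List Char) (s : Bool),
    (PySem.List.pyRange (k : Int) ((cs.length : Nat) : Int) 1).foldl (pvStepA cs) (acc, s)
      = (acc ++ (pvLoopP (cs.drop k) s).1, (pvLoopP (cs.drop k) s).2) := by
  induction m with
  | zero =>
    intro cs k h acc s
    have hk : cs.length ≤ k := by omega
    have hempty : PySem.List.pyRange (k : Int) ((cs.length : Nat) : Int) 1 = [] := by
      cases hh : PySem.List.pyRange (k : Int) ((cs.length : Nat) : Int) 1 with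
      | nil => rfl
      | cons a t =>
        have : a ∈ PySem.List.pyRange (k : Int) ((cs.length : Nat) : Int) 1 := hh ▸ List.mem_cons_self
        rw [PySem.List.mem_pyRange_one] at this
        omega
    rw [hempty, List.drop_eq_nil_of_le hk]
    simp [pvLoopP]
  | succ m ih =>
    intro cs k h acc s
    by_cases hk : k < cs.length
    · rw [PySem.List.pyRange_one_cons (by exact_mod_cast hk)]
      simp only [List.foldl_cons]
      have hdrop : cs.drop k = cs[k] :: cs.drop (k + 1) := List.drop_eq_getElem_cons hk
      have hget : PySem.List.pyGetD cs (k : Int) ' ' = cs[k] := by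
        rw [PySem.List.pyGetD_natCast, List.getD_eq_getElem?_getD, List.getElem?_eq_getElem hk]
        rfl
      have hone : ((k : Int) + 1) = (((k + 1 : Nat)) : Int) := by push_cast; ring
      have hih := fun acc' s' => ih cs (k + 1) (by omega) acc' s'
      rw [hdrop]
      simp only [pvLoopP, pvStepA, hget]
      have hcond : (cs[k] = '<' ∧ PySem.Chars.endswith (PySem.Chars.slice cs none (some ((k : Int) + 2))) ['@'] = true)
          ↔ (cs[k] = '<' ∧ (cs.drop (k + 1)).head? = some '@') := by
        constructor
        · rintro ⟨h1, h2⟩; exact ⟨h1, (pvCondA cs k hk h1).mp h2⟩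
        · rintro ⟨h1, h2⟩; exact ⟨h1, (pvCondA cs k hk h1).mpr h2⟩
      by_cases hC : cs[k] = '<' ∧ (cs.drop (k + 1)).head? = some '@'
      · rw [if_pos (hcond.mpr hC), if_pos hC, hone]
        exact hih acc true
      · rw [if_neg (fun hx => hC (hcond.mp hx)), if_neg hC]
        by_cases hgt : cs[k] = '>' ∧ s = true
        · rw [if_pos hgt, if_pos hgt, hone]
          exact hih acc false
        · rw [if_neg hgt, if_neg hgt]
          cases s with
          | false =>
            simp only [if_true]
            rw [hone, hih (acc ++ [cs[k]]) false]
            simp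
          | true =>
            simp only [Bool.true_eq_false, if_false]
            rw [hone]
            exact hih acc true
    · have hempty : PySem.List.pyRange (k : Int) ((cs.length : Nat) : Int) 1 = [] := by
        cases hh : PySem.List.pyRange (k : Int) ((cs.length : Nat) : Int) 1 with
        | nil => rfl
        | cons a t =>
          have : a ∈ PySem.List.pyRange (k : Int) ((cs.length : Nat) : Int) 1 := hh ▸ List.mem_cons_self
          rw [PySem.List.mem_pyRange_one] at this
          omega
      rw [hempty, List.drop_eq_nil_of_le (by omega)]
      simp [pvLoopP]

lemma pvH (cs : List Char) : (pvLoopP cs true).1 = (pvLoopP (pvDropMention cs) false).1 := by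
  induction cs with
  | nil => simp [pvLoopP, pvDropMention]
  | cons c rest ih =>
    simp only [pvLoopP, pvDropMention]
    by_cases hC : c = '<' ∧ rest.head? = some '@'
    · rw [if_pos hC, if_neg (by simp [hC.1])]
      exact ih
    · rw [if_neg hC]
      by_cases hgt : c = '>'
      · rw [if_pos (by simp [hgt]), if_pos hgt]
      · rw [if_neg (by simp [hgt]), if_neg hgt]
        simpa using ih

lemma pvG_aux (m : Nat) : ∀ cs : List Char, cs.length ≤ m → (pvLoopP cs false).1 = pvScrub cs := by
  induction m with
  | zero =>
    intro cs h
    have hnil : cs = [] := List.length_eq_zero_iff.mp (by omega)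
    subst hnil
    simp [pvLoopP, pvScrub]
  | succ m ih =>
    intro cs h
    cases cs with
    | nil => simp [pvLoopP, pvScrub]
    | cons c rest =>
      rw [pvScrub]
      simp only [pvLoopP]
      by_cases hC : c = '<' ∧ rest.head? = some '@'
      · rw [if_pos hC, if_pos hC, pvH]
        exact ih _ (by have := pvDropMention_length_le rest; simp at h; omega)
      · rw [if_neg hC, if_neg hC, if_neg (by simp)]
        simp [ih rest (by simp at h; omega)]

lemma pvG (cs : List Char) : (pvLoopP cs false).1 = pvScrub cs :=
  pvG_aux cs.length cs le_rfl

lemma pvGetD_at (cs : List Char) (i : Nat) (h : i < cs.length) :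
    PySem.List.pyGetD cs (i : Int) ' ' = cs[i] := by
  rw [PySem.List.pyGetD_natCast, List.getD_eq_getElem?_getD, List.getElem?_eq_getElem h]
  rfl

lemma pvDropMention_of_not_mem (l : List Char) (h : '>' ∉ l) : pvDropMention l = [] := by
  induction l with
  | nil => rfl
  | cons c rest ih =>
    simp only [pvDropMention]
    rw [if_neg (fun hcc => h (List.mem_cons.mpr (Or.inl hcc.symm)))]
    exact ih (fun hm => h (List.mem_cons_of_mem _ hm))

lemma pvDropMention_eq_drop (l : List Char) (j : Nat)
    (h1 : (l.drop j).head? = some '>') (h2 : ∀ jj, jj < j → (l.drop jj).head? ≠ some '>') :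
    pvDropMention l = l.drop (j + 1) := by
  induction l generalizing j with
  | nil => simp at h1
  | cons c rest ih =>
    cases j with
    | zero =>
      simp only [List.drop_zero, List.head?_cons, Option.some.injEq] at h1
      simp only [pvDropMention, if_pos h1]
      simp
    | succ j' =>
      have hc : ¬ (c = '>') := by
        intro hcc
        exact h2 0 (by omega) (by simp [hcc])
      simp only [pvDropMention, if_neg hc]
      have : rest.drop (j' + 1) = (c :: rest).drop (j' + 2) := by simp
      rw [ih j' (by simpa using h1) (fun jj hjj => by
        have := h2 (jj + 1) (by omega)
        simpa using this)]
      simp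

lemma pvB_aux (m : Nat) : ∀ (cs : List Char) (i : Nat), cs.length ≤ i + m →
    pvBLoop cs i = pvScrub (cs.drop i) := by
  induction m with
  | zero =>
    intro cs i h
    rw [pvBLoop, dif_neg (by omega), List.drop_eq_nil_of_le (by omega)]
    simp [pvScrub]
  | succ m ih =>
    intro cs i h
    by_cases hi : i < cs.length
    · rw [pvBLoop, dif_pos hi]
      have hdrop : cs.drop i = cs[i] :: cs.drop (i + 1) := List.drop_eq_getElem_cons hi
      by_cases hc : i + 1 < cs.length ∧ PySem.List.pyGetD cs (i : Int) ' ' = '<'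
          ∧ PySem.List.pyGetD cs ((i : Int) + 1) ' ' = '@'
      · -- a mention starts at i
        rw [dif_pos hc]
        obtain ⟨hlen1, hl, hnext⟩ := hc
        have hi2 : i + 2 ≤ cs.length := by omega
        have hcast2 : ((i : Int) + 2) = ((i + 2 : Nat) : Int) := by push_cast; ring
        have hff := PySem.Chars.findFrom_natCast cs ['>'] (i + 2) hi2
        have hl' : cs[i] = '<' := by
          rw [pvGetD_at cs i hi] at hl; exact hl
        have hnext' : cs[i + 1] = '@' := by
          rw [show ((i : Int) + 1) = ((i + 1 : Nat) : Int) by push_cast; ring,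
            pvGetD_at cs (i + 1) hlen1] at hnext
          exact hnext
        have hdrop1 : cs.drop (i + 1) = '@' :: cs.drop (i + 2) := by
          rw [List.drop_eq_getElem_cons hlen1]
          exact congrArg (fun ch => ch :: cs.drop (i + 2)) hnext'
        have hscrub : pvScrub (cs.drop i) = pvScrub (pvDropMention (cs.drop (i + 2))) := by
          rw [hdrop, pvScrub, if_pos ⟨hl', by rw [hdrop1]; rfl⟩, hdrop1]
          simp only [pvDropMention]
          rw [if_neg (by decide)]
        rw [hscrub, hcast2, hff]
        by_cases hfneg : PySem.Chars.find (cs.drop (i + 2)) ['>'] = -1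
        · rw [if_pos hfneg, dif_pos rfl]
          rw [ih cs cs.length (by omega), List.drop_eq_nil_of_le le_rfl]
          rw [pvDropMention_of_not_mem]
          intro hmem
          rw [PySem.Chars.find_eq_neg_one_iff] at hfneg
          exact hfneg ((List.singleton_infix_iff _ _).mpr hmem)
        · have hf0 : (0 : Int) ≤ PySem.Chars.find (cs.drop (i + 2)) ['>'] := by
            have := PySem.Chars.neg_one_le_find (cs.drop (i + 2)) ['>']
            omega
          set f := PySem.Chars.find (cs.drop (i + 2)) ['>'] with hfdef
          rw [if_neg hfneg, dif_neg (by omega : ¬ (((i + 2 : Nat) : Int) + f = -1))]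
          obtain ⟨hpre, hmin⟩ := PySem.Chars.find_spec hf0
          have htn : (((i + 2 : Nat) : Int) + f).toNat = i + 2 + f.toNat := by omega
          rw [htn]
          have hdm : pvDropMention (cs.drop (i + 2)) = (cs.drop (i + 2)).drop (f.toNat + 1) := by
            apply pvDropMention_eq_drop
            · exact (pvSingleton_prefix _ _).mp hpre
            · intro jj hjj hhd
              exact hmin jj hjj ((pvSingleton_prefix _ _).mpr hhd)
          rw [ih cs (i + 2 + f.toNat + 1) (by omega), hdm, List.drop_drop,
            Nat.add_assoc]
      · -- no mention starts at i: emit cs[i] and continue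
        rw [dif_neg hc]
        rw [hdrop, pvScrub]
        have hnc : ¬ (cs[i] = '<' ∧ (cs.drop (i + 1)).head? = some '@') := by
          intro ⟨hl, hh⟩
          apply hc
          have hlen1 : i + 1 < cs.length := by
            by_contra hge
            rw [List.drop_eq_nil_of_le (by omega)] at hh
            simp at hh
          refine ⟨hlen1, by rw [pvGetD_at cs i hi]; exact hl, ?_⟩
          have : ((i : Int) + 1) = ((i + 1 : Nat) : Int) := by push_cast; ring
          rw [this, pvGetD_at cs (i + 1) hlen1]
          rw [List.drop_eq_getElem_cons hlen1] at hh
          simp only [List.head?_cons, Option.some.injEq] at hh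
          exact hh
        rw [if_neg hnc, pvGetD_at cs i hi, ih cs (i + 1) (by omega)]
    · rw [pvBLoop, dif_neg hi, List.drop_eq_nil_of_le (by omega)]
      simp [pvScrub]

lemma pvB_eq_scrub (cs : List Char) (i : Nat) : pvBLoop cs i = pvScrub (cs.drop i) :=
  pvB_aux cs.length cs i (by omega)

-- ===== VERDICT (by name: the statement is the Claim_ definition above) =====
theorem clear_mentions_spec : Claim_equal_clear_mentions := by
  intro message _
  unfold Spec_clear_mentions clear_mentions clear_mentions_alt
  have hlen : PySem.Chars.len message.toList = ((message.toList.length : Nat) : Int) :=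
    PySem.Chars.len_eq _
  have h0 : (0 : Int) = ((0 : Nat) : Int) := rfl
  rw [hlen, h0, pvL1 message.toList.length message.toList 0 (by omega) [] false]
  simp only [List.drop_zero, List.nil_append]
  rw [pvG, pvB_eq_scrub message.toList 0, List.drop_zero]
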